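-- pv_equiv track=rewrite | github.com/Maguchy/YIM | Самостоятельная работа 6/6.3.py | count_most_frequent_digits
-- ===== SOURCE A (Python) =====
-- def count_most_frequent_digits(numbers_str):
--     digits_count = {}
--
--     for digit in numbers_str:
--         if digit.isdigit():
--             digit = int(digit)
--             digits_count[digit] = digits_count.get(digit, 0) + 1
--
--     sorted_digits_count = dict(sorted(digits_count.items(), key=lambda x: x[1], reverse=True))
--     most_frequent_digits = dict(list(sorted_digits_count.items())[:3])
--
--     return most_frequent_digits
-- ===== SOURCE B (Python) =====
-- def count_most_frequent_digits(numbers_str):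
--     counts = {}
--     for ch in numbers_str:
--         if ch.isdigit():
--             d = int(ch)
--             counts[d] = counts.get(d, 0) + 1
--     result = {}
--     for _ in range(3):
--         if not counts:
--             break
--         best, cnt = max(counts.items(), key=lambda kv: kv[1])
--         del counts[best]
--         result[best] = cnt
--     return result
-- ===== Notes on version B (the rewrite author's own statement) =====
-- stated objective: alternative
-- what changed: B keeps the single counting pass but replaces A's full stable descending sort of the count table (then slicing the first 3) by a partial selection: three repeated first-max extractions from the table, which reproduces the same order and first-insertion tie-breaking.
import Mathlib
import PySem

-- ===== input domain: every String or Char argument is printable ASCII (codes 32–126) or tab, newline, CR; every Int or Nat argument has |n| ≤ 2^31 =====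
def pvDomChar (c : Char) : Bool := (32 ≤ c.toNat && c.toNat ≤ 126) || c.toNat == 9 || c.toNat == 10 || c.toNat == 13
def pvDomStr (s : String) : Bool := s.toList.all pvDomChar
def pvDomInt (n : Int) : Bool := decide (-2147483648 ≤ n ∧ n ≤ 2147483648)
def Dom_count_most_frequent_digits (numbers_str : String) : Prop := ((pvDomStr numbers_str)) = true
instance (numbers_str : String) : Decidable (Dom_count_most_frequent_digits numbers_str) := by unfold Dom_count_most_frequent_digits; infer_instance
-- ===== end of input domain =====

-- B replaces A's full stable sort of the digit-count table by a partial selection: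
-- three repeated first-max extractions (alternative decomposition; same ordering and tie-breaks).


-- ===== PORT A =====
-- A's counting loop: for digit in numbers_str: if digit.isdigit(): digits_count[int(digit)] += 1
-- int(digit) for a single char with isdigit true ('0'..'9') is its code minus 48 — exact there.
def pvCountA (numbers_str : String) : PySem.Dict Int Int :=
  numbers_str.toList.foldl
    (fun digits_count digit =>
      if PySem.Str.isdigit digit then
        digits_count.insert ((digit.toNat : Int) - 48)
          (digits_count.getD ((digit.toNat : Int) - 48) 0 + 1)
      else digits_count)
    PySem.Dict.empty

def count_most_frequent_digits (numbers_str : String) : List (Int × Int) :=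
  let digits_count := pvCountA numbers_str
  let sorted_digits_count :=
    PySem.Dict.ofList (PySem.List.sorted digits_count.items (fun x => x.2) true)
  -- list(...)[:3] with a nonnegative literal bound is take 3 — exact
  let most_frequent_digits := PySem.Dict.ofList (sorted_digits_count.items.take 3)
  most_frequent_digits.items

-- ===== PORT B =====
-- B's counting loop (same first pass as A's Python, B's own code)
def pvCountB (numbers_str : String) : PySem.Dict Int Int :=
  numbers_str.toList.foldl
    (fun counts ch =>
      if PySem.Str.isdigit ch then
        counts.insert ((ch.toNat : Int) - 48) (counts.getD ((ch.toNat : Int) - 48) 0 + 1)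
      else counts)
    PySem.Dict.empty

-- for _ in range(3): if not counts: break; best,cnt = max(counts.items(), key=kv[1]); del counts[best]; result[best] = cnt
def pvPick : Nat → PySem.Dict Int Int → PySem.Dict Int Int → PySem.Dict Int Int
  | 0, _, result => result
  | n + 1, counts, result =>
    if counts.items = [] then result
    else
      match PySem.List.max? counts.items (fun kv => kv.2) with
      | none => result  -- unreachable: max? is some on a nonempty list
      | some (best, cnt) => pvPick n (counts.erase best) (result.insert best cnt)

def count_most_frequent_digits_alt (numbers_str : String) : List (Int × Int) :=
  (pvPick 3 (pvCountB numbers_str) PySem.Dict.empty).items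

-- ===== PRECONDITION & SPEC =====
def Spec_count_most_frequent_digits (numbers_str : String) (out : List (Int × Int)) : Prop := out = count_most_frequent_digits_alt numbers_str
instance (numbers_str : String) (out : List (Int × Int)) : Decidable (Spec_count_most_frequent_digits numbers_str out) := by unfold Spec_count_most_frequent_digits; infer_instance

-- ===== CLAIM (what is proved, stated in full; the proofs are below) =====
def Claim_equal_count_most_frequent_digits : Prop := ∀ (numbers_str : String), Dom_count_most_frequent_digits numbers_str → Spec_count_most_frequent_digits numbers_str (count_most_frequent_digits numbers_str)

-- ===== LEMMAS AND PROOFS =====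

-- The two counting passes are the same fold.
theorem pvCountB_eq_pvCountA (s : String) : pvCountB s = pvCountA s := rfl

-- Keys of the counting dict are unique.
theorem nodup_keys_count_aux (l : List Char) (d : PySem.Dict Int Int) (h : d.keys.Nodup) :
    (l.foldl
      (fun digits_count digit =>
        if PySem.Str.isdigit digit then
          digits_count.insert ((digit.toNat : Int) - 48)
            (digits_count.getD ((digit.toNat : Int) - 48) 0 + 1)
        else digits_count) d).keys.Nodup := by
  induction l generalizing d with
  | nil => simpa using h
  | cons c t ih =>
    simp only [List.foldl_cons]
    by_cases hc : PySem.Str.isdigit c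
    · rw [if_pos hc]; exact ih _ (PySem.Dict.nodup_keys_insert _ _ _ h)
    · rw [if_neg hc]; exact ih _ h

theorem nodup_keys_pvCountA (s : String) : (pvCountA s).keys.Nodup := by
  unfold pvCountA
  exact nodup_keys_count_aux s.toList PySem.Dict.empty PySem.Dict.nodup_keys_empty

-- Selection step of the stable reverse sort: the sorted list starts with the FIRST
-- maximal element, followed by the sort of the list with that occurrence erased.
theorem sel_step {α : Type} [BEq α] [LawfulBEq α] (key : α → Int) (l : List α) (m : α)
    (h : PySem.List.max? l key = some m) :
    PySem.List.sorted l key true = m :: PySem.List.sorted (l.erase m) key true := by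
  induction l using List.reverseRecOn generalizing m with
  | nil => simp [PySem.List.max?] at h
  | append_singleton l x ih =>
    have hstep : PySem.List.max? (l ++ [x]) key
        = (match PySem.List.max? l key with
           | none => some x
           | some m' => if key m' < key x then some x else some m') := by
      simp only [PySem.List.max?, List.foldl_append, List.foldl_cons, List.foldl_nil]
      rfl
    have hsorted : PySem.List.sorted (l ++ [x]) key true
        = PySem.List.insertBy (fun a b => decide (key b < key a)) x
            (PySem.List.sorted l key true) := by
      rw [PySem.List.sorted_rev_eq_foldl_insertBy, List.foldl_append,
        ← PySem.List.sorted_rev_eq_foldl_insertBy]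
      simp
    rw [hstep] at h
    cases hml : PySem.List.max? l key with
    | none =>
      have hl : l = [] := (PySem.List.max?_eq_none_iff l key).mp hml
      rw [hml] at h
      simp at h
      subst hl; subst h
      simp [PySem.List.sorted, PySem.List.insertBy]
    | some m' =>
      rw [hml] at h
      by_cases hcmp : key m' < key x
      · simp only [if_pos hcmp] at h
        obtain rfl : m = x := (Option.some.inj h).symm
        have hnotmem : m ∉ l := by
          intro hmem
          exact absurd (PySem.List.max?_isMax hml m hmem) (by omega)
        have herase : (l ++ [m]).erase m = l := by
          rw [List.erase_append_right _ hnotmem]; simp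
        rw [herase, hsorted, ih m' hml]
        simp [PySem.List.insertBy, hcmp]
      · simp only [if_neg hcmp] at h
        obtain rfl : m = m' := (Option.some.inj h).symm
        have hmem : m ∈ l := PySem.List.max?_mem hml
        have herase : (l ++ [x]).erase m = l.erase m ++ [x] :=
          List.erase_append_left _ hmem
        have hsorted' : PySem.List.sorted (l.erase m ++ [x]) key true
            = PySem.List.insertBy (fun a b => decide (key b < key a)) x
                (PySem.List.sorted (l.erase m) key true) := by
          rw [PySem.List.sorted_rev_eq_foldl_insertBy, List.foldl_append,
            ← PySem.List.sorted_rev_eq_foldl_insertBy]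
          simp
        rw [herase, hsorted, hsorted', ih m hml]
        simp [PySem.List.insertBy, hcmp]

-- Erasing a key from a dict with unique keys erases exactly the pair.
theorem filter_ne_key_eq_erase {l : List (Int × Int)} {m : Int × Int}
    (hnd : (l.map Prod.fst).Nodup) (hm : m ∈ l) :
    l.filter (fun p => !(p.1 == m.1)) = l.erase m := by
  induction l with
  | nil => cases hm
  | cons p t ih =>
    simp only [List.map_cons, List.nodup_cons] at hnd
    by_cases hpm : p = m
    · subst hpm
      have hkey : ∀ q ∈ t, ¬(q.1 == p.1) = true := by
        intro q hq hbeq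
        exact hnd.1 (List.mem_map.mpr ⟨q, hq, by simpa using hbeq⟩)
      rw [List.erase_cons_head]
      rw [List.filter_cons_of_neg (by simp)]
      rw [List.filter_eq_self.mpr (by intro q hq; simpa using hkey q hq)]
    · have hmt : m ∈ t := by cases hm with | head => exact absurd rfl hpm | tail _ h => exact h
      have hne : ¬(p.1 == m.1) = true → True := fun _ => trivial
      have hkeyne : p.1 ≠ m.1 := by
        intro heq
        exact hnd.1 (List.mem_map.mpr ⟨m, hmt, heq.symm⟩)
      rw [List.filter_cons_of_pos (by simpa using hkeyne)]
      rw [List.erase_cons_tail (by simpa using fun h => hpm h)]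
      rw [ih hnd.2 hmt]

theorem items_erase_of_mem {d : PySem.Dict Int Int} {m : Int × Int}
    (hnd : d.keys.Nodup) (hm : m ∈ d.items) :
    (d.erase m.1).items = d.items.erase m := by
  have : d.keys = d.items.map Prod.fst := rfl
  rw [this] at hnd
  exact filter_ne_key_eq_erase hnd hm

-- The selection loop, with the sorted-prefix invariant.
theorem pick_eq (n : Nat) (counts result : PySem.Dict Int Int)
    (hnd : counts.keys.Nodup)
    (hdisj : ∀ p ∈ counts.items, result.contains p.1 = false) :
    (pvPick n counts result).items
      = result.items ++ (PySem.List.sorted counts.items (fun x => x.2) true).take n := by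
  induction n generalizing counts result with
  | zero => simp [pvPick]
  | succ n ih =>
    by_cases hc : counts.items = []
    · simp [pvPick, hc, PySem.List.sorted]
    · obtain ⟨m, hm⟩ : ∃ m, PySem.List.max? counts.items (fun kv => kv.2) = some m := by
        cases hmx : PySem.List.max? counts.items (fun kv => kv.2) with
        | none => exact absurd ((PySem.List.max?_eq_none_iff _ _).mp hmx) hc
        | some m => exact ⟨m, rfl⟩
      obtain ⟨b, c⟩ := m
      have hmem : (b, c) ∈ counts.items := PySem.List.max?_mem hm
      have hfst : ((b, c) : Int × Int).1 = b := rfl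
      have hcontains : result.contains b = false := hdisj _ hmem
      have hitems' : (counts.erase b).items = counts.items.erase (b, c) := by
        simpa using items_erase_of_mem hnd hmem
      have hndkeys : counts.keys = counts.items.map Prod.fst := rfl
      have hnd' : (counts.erase b).keys.Nodup := by
        have : (counts.erase b).keys = (counts.items.erase (b, c)).map Prod.fst := by
          rw [show (counts.erase b).keys = (counts.erase b).items.map Prod.fst from rfl, hitems']
        rw [this]
        exact ((List.erase_sublist : (counts.items.erase (b, c)).Sublist counts.items).map Prod.fst).nodup
          (by rw [← hndkeys]; exact hnd)
      have hinj : ∀ x ∈ counts.items, ∀ y ∈ counts.items, x.1 = y.1 → x = y := by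
        have h' : (counts.items.map Prod.fst).Nodup := by rw [← hndkeys]; exact hnd
        intro x hx y hy hxy
        exact List.inj_on_of_nodup_map h' hx hy hxy
      have hdisj' : ∀ p ∈ (counts.erase b).items,
          (result.insert b c).contains p.1 = false := by
        intro p hp
        rw [hitems'] at hp
        have hpc : p ∈ counts.items := (List.erase_sublist : (counts.items.erase (b, c)).Sublist counts.items).mem hp
        have hpb : p.1 ≠ b := by
          intro heq
          have hpmeq : p = (b, c) := hinj p hpc (b, c) hmem heq
          have hnodup : counts.items.Nodup := by
            have h' : (counts.items.map Prod.fst).Nodup := by rw [← hndkeys]; exact hnd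
            exact h'.of_map
          rw [hpmeq] at hp
          exact hnodup.not_mem_erase hp
        rw [PySem.Dict.contains_insert]
        simp [hpb, hdisj p hpc]
      have hins : (result.insert b c).items = result.items ++ [(b, c)] :=
        PySem.Dict.items_insert_of_not_contains result c hcontains
      have hsort : PySem.List.sorted counts.items (fun x => x.2) true
          = (b, c) :: PySem.List.sorted (counts.items.erase (b, c)) (fun x => x.2) true :=
        sel_step _ _ _ hm
      calc (pvPick (n + 1) counts result).items
          = (pvPick n (counts.erase b) (result.insert b c)).items := by
            simp only [pvPick, if_neg hc, hm]
        _ = (result.insert b c).items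
              ++ (PySem.List.sorted (counts.erase b).items (fun x => x.2) true).take n :=
            ih _ _ hnd' hdisj'
        _ = result.items ++ ((b, c)
              :: PySem.List.sorted (counts.items.erase (b, c)) (fun x => x.2) true).take (n + 1) := by
            rw [hins, hitems', List.take_succ_cons, List.append_assoc]; rfl
        _ = result.items
              ++ (PySem.List.sorted counts.items (fun x => x.2) true).take (n + 1) := by
            rw [hsort]

-- ofList on a list with unique keys rebuilds exactly that list.
theorem items_ofList_of_nodup (l : List (Int × Int)) (hnd : (l.map Prod.fst).Nodup) :
    (PySem.Dict.ofList l).items = l := by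
  have h := PySem.Dict.items_foldl_insert_fresh (l := l) (k := Prod.fst) (v := Prod.snd)
    (d := (PySem.Dict.empty : PySem.Dict Int Int))
    (by intro a _; exact PySem.Dict.contains_empty (ν := Int) a.1) hnd
  have hfold : (PySem.Dict.ofList l) = l.foldl (fun d a => d.insert a.1 a.2) PySem.Dict.empty := rfl
  rw [hfold, h]
  simp [PySem.Dict.empty]

-- ===== VERDICT (by name: the statement is the Claim_ definition above) =====
theorem count_most_frequent_digits_spec : Claim_equal_count_most_frequent_digits := by
  intro s _
  unfold Spec_count_most_frequent_digits count_most_frequent_digits count_most_frequent_digits_alt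
  rw [pvCountB_eq_pvCountA]
  set D := pvCountA s with hD
  have hnd : D.keys.Nodup := nodup_keys_pvCountA s
  have hndfst : (D.items.map Prod.fst).Nodup := hnd
  set SL := PySem.List.sorted D.items (fun x => x.2) true with hSL
  have hperm : SL.Perm D.items := PySem.List.sorted_perm _ _ _
  have hndSL : (SL.map Prod.fst).Nodup := ((hperm.map Prod.fst).nodup_iff).mpr hndfst
  have h1 : (PySem.Dict.ofList SL).items = SL := items_ofList_of_nodup SL hndSL
  have hndtake : ((SL.take 3).map Prod.fst).Nodup :=
    ((SL.take_sublist 3).map Prod.fst).nodup hndSL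
  have h2 : (PySem.Dict.ofList (SL.take 3)).items = SL.take 3 :=
    items_ofList_of_nodup _ hndtake
  have h3 := pick_eq 3 D PySem.Dict.empty hnd
    (by intro p _; exact PySem.Dict.contains_empty p.1)
  simp only [h1, h2, h3, ← hSL]
  simp [PySem.Dict.empty]
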